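-- pv_equiv track=rewrite | github.com/bigmike9000/hyperuniformity | scripts/search_cubic_tilings.py | enum_rows
-- ===== SOURCE A (Python) =====
-- def enum_rows(max_sum=4):
--     """Enumerate all non-negative integer triples with sum in [1, max_sum]."""
--     rows = []
--     for s in range(1, max_sum + 1):
--         for a in range(s + 1):
--             for b in range(s - a + 1):
--                 c = s - a - b
--                 rows.append((a, b, c))
--     return rows
-- ===== SOURCE B (Python) =====
-- import itertools
--
-- def enum_rows(max_sum=4):
--     """Enumerate all non-negative integer triples with sum in [1, max_sum]."""
--     cube = itertools.product(range(max_sum + 1), repeat=3)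
--     kept = [t for t in cube if 1 <= t[0] + t[1] + t[2] <= max_sum]
--     return sorted(kept, key=lambda t: (t[0] + t[1] + t[2], t[0], t[1]))
-- ===== Notes on version B (the rewrite author's own statement) =====
-- stated objective: idiomatic
-- what changed: Replaces A's constructive triple loop grouped by sum with a generate-filter-sort pipeline: itertools.product builds the whole cube, a comprehension keeps triples with sum in [1, max_sum], and sorted with key (sum, a, b) restores A's by-sum-then-lexicographic order.
import Mathlib
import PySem

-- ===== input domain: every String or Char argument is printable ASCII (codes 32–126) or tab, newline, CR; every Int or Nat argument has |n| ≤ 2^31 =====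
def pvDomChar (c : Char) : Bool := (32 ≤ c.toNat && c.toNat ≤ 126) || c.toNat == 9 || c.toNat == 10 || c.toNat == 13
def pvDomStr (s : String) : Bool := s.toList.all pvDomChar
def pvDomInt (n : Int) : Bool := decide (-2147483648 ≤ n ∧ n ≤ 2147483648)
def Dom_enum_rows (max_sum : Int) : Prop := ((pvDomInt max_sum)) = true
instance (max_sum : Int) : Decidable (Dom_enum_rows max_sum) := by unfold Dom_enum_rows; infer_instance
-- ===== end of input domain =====

-- B replaces A's grouped nested loops by a generate-filter-sort pipeline (idiomatic itertools style; same asymptotic cost).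

-- ===== PORT A =====
def enum_rows (max_sum : Int) : List (Int × Int × Int) :=
  (PySem.List.pyRange 1 (max_sum + 1) 1).foldl (fun rows s =>
    (PySem.List.pyRange 0 (s + 1) 1).foldl (fun rows a =>
      (PySem.List.pyRange 0 (s - a + 1) 1).foldl (fun rows b =>
        rows ++ [(a, b, s - a - b)]) rows) rows) []

-- ===== PORT B =====
-- itertools.product(range(max_sum+1), repeat=3), the sum filter, then a sort by the tuple key
-- (sum, a, b); the Python tuple key is lexicographic, ported as the Lex product order.
def enum_rows_alt (max_sum : Int) : List (Int × Int × Int) :=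
  let cube := (PySem.List.pyRange 0 (max_sum + 1) 1).flatMap (fun a =>
    (PySem.List.pyRange 0 (max_sum + 1) 1).flatMap (fun b =>
      (PySem.List.pyRange 0 (max_sum + 1) 1).map (fun c => (a, b, c))))
  let kept := cube.filter (fun t =>
    decide (1 ≤ t.1 + t.2.1 + t.2.2) && decide (t.1 + t.2.1 + t.2.2 ≤ max_sum))
  PySem.List.sorted kept
    (fun t => (toLex (t.1 + t.2.1 + t.2.2, toLex (t.1, t.2.1)) : Int ×ₗ Int ×ₗ Int)) false

-- ===== PRECONDITION & SPEC =====
def Spec_enum_rows (max_sum : Int) (out : List (Int × Int × Int)) : Prop := out = enum_rows_alt max_sum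
instance (max_sum : Int) (out : List (Int × Int × Int)) : Decidable (Spec_enum_rows max_sum out) := by unfold Spec_enum_rows; infer_instance

-- ===== CLAIM (what is proved, stated in full; the proofs are below) =====
def Claim_equal_enum_rows : Prop := ∀ (max_sum : Int), Dom_enum_rows max_sum → Spec_enum_rows max_sum (enum_rows max_sum)

-- ===== LEMMAS AND PROOFS =====

-- A's triple loop, written as a flatMap
theorem enum_rows_eq_flatMap (M : Int) :
    enum_rows M = (PySem.List.pyRange 1 (M + 1) 1).flatMap (fun s =>
      (PySem.List.pyRange 0 (s + 1) 1).flatMap (fun a =>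
        (PySem.List.pyRange 0 (s - a + 1) 1).map (fun b => (a, b, s - a - b)))) := by
  simp only [enum_rows, PySem.List.foldl_append_eq_flatMap, List.nil_append, List.map_eq_flatMap]

-- A's output is strictly increasing under B's sort key
theorem enum_rows_pairwise (M : Int) :
    (enum_rows M).Pairwise (fun x y =>
      (toLex (x.1 + x.2.1 + x.2.2, toLex (x.1, x.2.1)) : Int ×ₗ Int ×ₗ Int) <
      toLex (y.1 + y.2.1 + y.2.2, toLex (y.1, y.2.1))) := by
  rw [enum_rows_eq_flatMap]
  rw [List.pairwise_flatMap]
  constructor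
  · intro s _
    rw [List.pairwise_flatMap]
    constructor
    · intro a _
      rw [List.pairwise_map]
      refine (PySem.List.pairwise_lt_pyRange_one 0 (s - a + 1)).imp ?_
      intro b b' hbb
      simp only [Prod.Lex.toLex_lt_toLex, true_and, lt_self_iff_false, false_or]
      omega
    · refine (PySem.List.pairwise_lt_pyRange_one 0 (s + 1)).imp ?_
      intro a a' haa x hx y hy
      simp only [List.mem_map] at hx hy
      obtain ⟨b, _, rfl⟩ := hx
      obtain ⟨b', _, rfl⟩ := hy
      simp only [Prod.Lex.toLex_lt_toLex]
      omega
  · refine (PySem.List.pairwise_lt_pyRange_one 1 (M + 1)).imp ?_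
    intro s s' hss x hx y hy
    simp only [List.mem_flatMap, List.mem_map] at hx hy
    obtain ⟨a, _, b, _, rfl⟩ := hx
    obtain ⟨a', _, b', _, rfl⟩ := hy
    simp only [Prod.Lex.toLex_lt_toLex]
    omega

theorem mem_enum_rows (M : Int) (t : Int × Int × Int) :
    t ∈ enum_rows M ↔
      0 ≤ t.1 ∧ 0 ≤ t.2.1 ∧ 0 ≤ t.2.2 ∧ 1 ≤ t.1 + t.2.1 + t.2.2 ∧ t.1 + t.2.1 + t.2.2 ≤ M := by
  obtain ⟨a, b, c⟩ := t
  rw [enum_rows_eq_flatMap]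
  simp only [List.mem_flatMap, List.mem_map, PySem.List.mem_pyRange_one, Prod.mk.injEq]
  constructor
  · rintro ⟨s, hs, a', ha', b', hb', rfl, rfl, hc⟩
    omega
  · rintro ⟨h1, h2, h3, h4, h5⟩
    exact ⟨a + b + c, by omega, a, by omega, b, by omega, rfl, rfl, by omega⟩

theorem mem_kept (M : Int) (t : Int × Int × Int) :
    (t ∈ ((PySem.List.pyRange 0 (M + 1) 1).flatMap (fun a =>
        (PySem.List.pyRange 0 (M + 1) 1).flatMap (fun b =>
          (PySem.List.pyRange 0 (M + 1) 1).map (fun c => (a, b, c))))).filter (fun t =>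
        decide (1 ≤ t.1 + t.2.1 + t.2.2) && decide (t.1 + t.2.1 + t.2.2 ≤ M))) ↔
      0 ≤ t.1 ∧ 0 ≤ t.2.1 ∧ 0 ≤ t.2.2 ∧ 1 ≤ t.1 + t.2.1 + t.2.2 ∧ t.1 + t.2.1 + t.2.2 ≤ M := by
  obtain ⟨a, b, c⟩ := t
  simp only [List.mem_filter, List.mem_flatMap, List.mem_map, PySem.List.mem_pyRange_one,
    Bool.and_eq_true, decide_eq_true_eq, Prod.mk.injEq]
  constructor
  · rintro ⟨⟨a', ha', b', hb', c', hc', rfl, rfl, rfl⟩, h⟩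
    omega
  · rintro ⟨h1, h2, h3, h4, h5⟩
    exact ⟨⟨a, by omega, b, by omega, c, by omega, rfl, rfl, rfl⟩, by omega⟩

theorem kept_nodup (M : Int) :
    (((PySem.List.pyRange 0 (M + 1) 1).flatMap (fun a =>
        (PySem.List.pyRange 0 (M + 1) 1).flatMap (fun b =>
          (PySem.List.pyRange 0 (M + 1) 1).map (fun c => (a, b, c))))).filter (fun t =>
        decide (1 ≤ t.1 + t.2.1 + t.2.2) && decide (t.1 + t.2.1 + t.2.2 ≤ M))).Nodup := by
  apply List.Nodup.filter
  unfold List.Nodup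
  rw [List.pairwise_flatMap]
  constructor
  · intro a _
    rw [List.pairwise_flatMap]
    constructor
    · intro b _
      rw [List.pairwise_map]
      refine (PySem.List.pairwise_lt_pyRange_one 0 (M + 1)).imp ?_
      intro c c' hcc
      simp only [ne_eq, Prod.mk.injEq]
      omega
    · refine (PySem.List.pairwise_lt_pyRange_one 0 (M + 1)).imp ?_
      intro b b' hbb x hx y hy
      simp only [List.mem_map] at hx hy
      obtain ⟨c, _, rfl⟩ := hx
      obtain ⟨c', _, rfl⟩ := hy
      simp only [ne_eq, Prod.mk.injEq]
      omega
  · refine (PySem.List.pairwise_lt_pyRange_one 0 (M + 1)).imp ?_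
    intro a a' haa x hx y hy
    simp only [List.mem_flatMap, List.mem_map] at hx hy
    obtain ⟨b, _, c, _, rfl⟩ := hx
    obtain ⟨b', _, c', _, rfl⟩ := hy
    simp only [ne_eq, Prod.mk.injEq]
    omega

theorem enum_rows_nodup (M : Int) : (enum_rows M).Nodup :=
  (enum_rows_pairwise M).imp (fun hlt heq => by subst heq; exact lt_irrefl _ hlt)

-- ===== VERDICT (by name: the statement is the Claim_ definition above) =====
theorem enum_rows_spec : Claim_equal_enum_rows := by
  intro M _
  unfold Spec_enum_rows enum_rows_alt
  refine (PySem.List.sorted_eq_of_perm_of_pairwise_lt _ _ _ ?_ (enum_rows_pairwise M)).symm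
  refine (List.perm_ext_iff_of_nodup (enum_rows_nodup M) (kept_nodup M)).mpr ?_
  intro t
  rw [mem_enum_rows, mem_kept]
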